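-- pv_equiv track=rewrite | github.com/Mr0Bread/ForeCast | Program/DataHandler.py | is_possible_to_fill_missing_data
-- ===== SOURCE A (Python) =====
-- def is_possible_to_fill_missing_data(list_of_values: list) -> bool:
--     index = 0
--     adder = 1
--
--     while adder < 5 and index < len(list_of_values) - 1 and index + adder < len(list_of_values):
--         if list_of_values[index] == '-' and list_of_values[index + adder] == '-':
--             adder += 1
--         else:
--             index += adder
--             adder = 1
--     else:
--         if adder > 4:
--             return False
--         else:
--             return True
-- ===== SOURCE B (Python) =====
-- def is_possible_to_fill_missing_data(list_of_values: list) -> bool: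
--     marks = ''.join('1' if v == '-' else '0' for v in list_of_values)
--     return '11111' not in marks
-- ===== Notes on version B (the rewrite author's own statement) =====
-- stated objective: idiomatic
-- what changed: A's incremental two-pointer scan (index/adder with jump-ahead) is replaced by a precompute-then-search strategy: map each element to '1' iff it equals '-', join into a marker string, and test '11111' not in it.
import Mathlib
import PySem

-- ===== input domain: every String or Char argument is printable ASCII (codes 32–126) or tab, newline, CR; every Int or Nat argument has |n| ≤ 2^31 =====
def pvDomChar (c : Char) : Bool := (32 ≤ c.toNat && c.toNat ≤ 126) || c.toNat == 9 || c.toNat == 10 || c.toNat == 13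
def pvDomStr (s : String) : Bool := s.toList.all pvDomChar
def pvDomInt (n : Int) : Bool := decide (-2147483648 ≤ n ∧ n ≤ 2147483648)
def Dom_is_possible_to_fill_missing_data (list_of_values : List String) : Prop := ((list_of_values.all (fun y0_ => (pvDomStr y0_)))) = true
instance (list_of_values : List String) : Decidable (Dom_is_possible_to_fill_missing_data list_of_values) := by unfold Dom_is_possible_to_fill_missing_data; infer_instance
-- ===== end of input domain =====

-- Header: B replaces A's incremental two-pointer dash scan by building a 0/1 marker string
-- in one pass and testing for the substring "11111"; objective: idiomatic (same O(n) cost).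

-- ===== PORT A =====
-- Loop guard ensures index and index+adder are in range, so `getD _ ""` equals Python's indexing there.
def pvALoop (xs : List String) (index adder : Nat) : Bool :=
  if _h : adder < 5 ∧ index < xs.length - 1 ∧ index + adder < xs.length then
    if xs.getD index "" == "-" && xs.getD (index + adder) "" == "-" then
      pvALoop xs index (adder + 1)
    else
      pvALoop xs (index + adder) 1
  else
    if adder > 4 then false else true
termination_by xs.length + 5 - (index + adder)
decreasing_by all_goals omega

def is_possible_to_fill_missing_data (list_of_values : List String) : Bool :=
  pvALoop list_of_values 0 1

-- ===== PORT B =====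
def is_possible_to_fill_missing_data_alt (list_of_values : List String) : Bool :=
  let marks := PySem.Str.join "" (list_of_values.map (fun v => if v == "-" then "1" else "0"))
  !(PySem.Str.isIn "11111" marks)

-- ===== PRECONDITION & SPEC =====
def Spec_is_possible_to_fill_missing_data (list_of_values : List String) (out : Bool) : Prop := out = is_possible_to_fill_missing_data_alt list_of_values
instance (list_of_values : List String) (out : Bool) : Decidable (Spec_is_possible_to_fill_missing_data list_of_values out) := by unfold Spec_is_possible_to_fill_missing_data; infer_instance

-- ===== CLAIM (what is proved, stated in full; the proofs are below) =====
def Claim_equal_is_possible_to_fill_missing_data : Prop := ∀ (list_of_values : List String), Dom_is_possible_to_fill_missing_data list_of_values → Spec_is_possible_to_fill_missing_data list_of_values (is_possible_to_fill_missing_data list_of_values)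

-- ===== LEMMAS AND PROOFS =====

-- `pvRun5 xs j`: five consecutive "-" entries starting at index j.
def pvRun5 (xs : List String) (j : Nat) : Prop := ∀ k < 5, xs[j + k]? = some "-"

def pvHasRun (xs : List String) : Prop := ∃ j, j + 5 ≤ xs.length ∧ pvRun5 xs j

lemma pvGetD_dash {xs : List String} {p : Nat} (hp : p < xs.length) :
    (xs.getD p "" == "-") = true ↔ xs[p]? = some "-" := by
  simp [List.getD_eq_getElem?_getD, List.getElem?_eq_getElem hp]

-- Loop invariant characterisation of A's scan.
lemma pvALoop_eq (xs : List String) (i a : Nat)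
    (hInv : (1 ≤ a ∧ a ≤ 4
              ∧ (∀ j, j + 5 ≤ i + a → ¬ pvRun5 xs j)
              ∧ (i = 0 ∨ xs[i - 1]? ≠ some "-" ∨ xs[i]? ≠ some "-")
              ∧ (2 ≤ a → ∀ k < a, xs[i + k]? = some "-"))
           ∨ (a = 5 ∧ pvRun5 xs i)) :
    pvALoop xs i a = true ↔ ¬ pvHasRun xs := by
  rw [pvALoop]
  by_cases h : a < 5 ∧ i < xs.length - 1 ∧ i + a < xs.length
  · rcases hInv with ⟨ha1, ha4, hH1, hB, hH3⟩ | ⟨ha, _⟩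
    · simp only [dif_pos h]
      by_cases hd : (xs.getD i "" == "-") = true ∧ (xs.getD (i + a) "" == "-") = true
      · have hi : i < xs.length := by omega
        have hdi : xs[i]? = some "-" := (pvGetD_dash hi).mp hd.1
        have hdia : xs[i + a]? = some "-" := (pvGetD_dash h.2.2).mp hd.2
        rw [if_pos (by rw [Bool.and_eq_true]; exact hd)]
        have hrun : ∀ k < a + 1, xs[i + k]? = some "-" := by
          intro k hk
          rcases Nat.lt_or_ge k a with hk' | hk'
          · rcases Nat.eq_or_lt_of_le ha1 with ha1' | ha1'
            · have : k = 0 := by omega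
              simpa [this] using hdi
            · exact hH3 (by omega) k hk'
          · have : k = a := by omega
            simpa [this] using hdia
        apply pvALoop_eq
        rcases Nat.eq_or_lt_of_le (show a + 1 ≤ 5 by omega) with h5 | h5
        · right
          exact ⟨by omega, fun k hk => hrun k (by omega)⟩
        · left
          refine ⟨by omega, by omega, ?_, hB, fun _ k hk => hrun k hk⟩
          intro j hj hRj
          rcases Nat.lt_or_ge (j + 5) (i + a + 1) with hj' | hj'
          · exact hH1 j (by omega) hRj
          · -- j + 5 = i + a + 1; the run would cover both i - 1 and i
            have hji : j < i := by omega
            have h1 : xs[i - 1]? = some "-" := by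
              have := hRj (i - 1 - j) (by omega)
              rwa [show j + (i - 1 - j) = i - 1 by omega] at this
            rcases hB with hB | hB | hB
            · omega
            · exact hB h1
            · exact hB hdi
      · rw [if_neg (by rw [Bool.and_eq_true]; exact hd)]
        have hi : i < xs.length := by omega
        apply pvALoop_eq
        left
        by_cases hdi : xs[i]? = some "-"
        · have hdia : xs[i + a]? ≠ some "-" := fun hc =>
            hd ⟨(pvGetD_dash hi).mpr hdi, (pvGetD_dash h.2.2).mpr hc⟩
          refine ⟨le_refl 1, by omega, ?_, Or.inr (Or.inr hdia), by omega⟩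
          intro j hj hRj
          rcases Nat.lt_or_ge (j + 5) (i + a + 1) with hj' | hj'
          · exact hH1 j (by omega) hRj
          · have := hRj (i + a - j) (by omega)
            rw [show j + (i + a - j) = i + a by omega] at this
            exact hdia this
        · have ha1' : a = 1 := by
            by_contra hne
            exact hdi (by simpa using hH3 (by omega) 0 (by omega))
          subst ha1'
          refine ⟨le_refl 1, by omega, ?_, Or.inr (Or.inl (by simpa using hdi)), by omega⟩
          intro j hj hRj
          rcases Nat.lt_or_ge (j + 5) (i + 1 + 1) with hj' | hj'
          · exact hH1 j (by omega) hRj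
          · have := hRj (i - j) (by omega)
            rw [show j + (i - j) = i by omega] at this
            exact hdi this
    · omega
  · simp only [dif_neg h]
    rcases hInv with ⟨ha1, ha4, hH1, _, _⟩ | ⟨ha, hR⟩
    · rw [if_neg (by omega)]
      simp only [true_iff]
      rintro ⟨j, hj, hRj⟩
      have hlen : xs.length ≤ i + a := by omega
      exact hH1 j (by omega) hRj
    · rw [if_pos (by omega)]
      simp only [Bool.false_eq_true, false_iff, not_not]
      have h4 : xs[i + 4]? = some "-" := hR 4 (by omega)
      have : i + 4 < xs.length := by
        by_contra hc
        rw [List.getElem?_eq_none (by omega)] at h4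
        simp at h4
      exact ⟨i, by omega, hR⟩
termination_by xs.length + 5 - (i + a)
decreasing_by all_goals omega

-- B's marker string is the character image of the list.
lemma pvMarks_toList (xs : List String) :
    (PySem.Str.join "" (xs.map (fun v => if v == "-" then "1" else "0"))).toList
      = xs.map (fun v => if v == "-" then '1' else '0') := by
  rw [PySem.Str.toList_join]
  have : (xs.map (fun v => if v == "-" then "1" else "0")).map String.toList
      = (xs.map (fun v => if v == "-" then '1' else '0')).map (fun c => [c]) := by
    simp only [List.map_map]
    apply List.map_congr_left
    intro v _
    by_cases hv : v = "-" <;> simp [hv]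
  rw [this]
  simpa using PySem.Chars.join_nil_singletons (xs.map (fun v => if v == "-" then '1' else '0'))

-- The substring test is exactly pvHasRun.
lemma pvIsIn_iff (xs : List String) :
    PySem.Str.isIn "11111"
        (PySem.Str.join "" (xs.map (fun v => if v == "-" then "1" else "0"))) = true
      ↔ pvHasRun xs := by
  rw [PySem.Str.isIn_iff_infix, pvMarks_toList]
  have hsub : ("11111" : String).toList = List.replicate 5 '1' := by decide
  rw [hsub]
  set cs := xs.map (fun v => if v == "-" then '1' else '0') with hcs
  have hget : ∀ p : Nat, cs[p]? = some '1' ↔ xs[p]? = some "-" := by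
    intro p
    rw [hcs, List.getElem?_map]
    cases hx : xs[p]? with
    | none => simp
    | some v =>
      by_cases hv : v == "-"
      · simp [show v = "-" by simpa using hv]
      · simp only [Option.map_some]
        constructor
        · intro hc
          simp [hv] at hc
        · intro hc
          exact absurd (by simpa using hc) (by simpa using hv)
  constructor
  · rintro ⟨s, t, hst⟩
    refine ⟨s.length, ?_, ?_⟩
    · have := congrArg List.length hst
      simp [hcs] at this ⊢
      omega
    · intro k hk
      rw [← hget]
      have : cs[s.length + k]? = (List.replicate 5 '1')[k]? := by
        rw [← hst, List.getElem?_append_left (by simp; omega),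
          List.getElem?_append_right (by omega)]
        congr 1
        omega
      rw [this, List.getElem?_replicate]
      simp [hk]
  · rintro ⟨j, hj, hR⟩
    have hlen : xs.length = cs.length := by simp [hcs]
    have : List.replicate 5 '1' = (cs.drop j).take 5 := by
      apply List.ext_getElem?
      intro k
      rcases Nat.lt_or_ge k 5 with hk | hk
      · rw [List.getElem?_replicate]
        rw [List.getElem?_take]
        simp only [hk, if_pos]
        rw [List.getElem?_drop]
        exact ((hget (j + k)).mpr (hR k hk)).symm
      · rw [List.getElem?_replicate]
        simp only [show ¬ k < 5 from by omega, ite_false]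
        rw [List.getElem?_take]
        simp [show ¬ k < 5 from by omega]
    rw [this]
    exact ((cs.drop j).take_prefix 5).isInfix.trans (cs.drop_suffix j).isInfix

-- ===== VERDICT (by name: the statement is the Claim_ definition above) =====
theorem is_possible_to_fill_missing_data_spec : Claim_equal_is_possible_to_fill_missing_data := by
  intro xs _
  unfold Spec_is_possible_to_fill_missing_data
  unfold is_possible_to_fill_missing_data is_possible_to_fill_missing_data_alt
  show pvALoop xs 0 1
      = !PySem.Str.isIn "11111" (PySem.Str.join "" (xs.map (fun v => if v == "-" then "1" else "0")))
  have hA := pvALoop_eq xs 0 1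
    (Or.inl ⟨le_refl 1, by omega, by intro j hj _; omega, Or.inl rfl, by omega⟩)
  by_cases h : pvHasRun xs
  · have h1 : pvALoop xs 0 1 = false := by
      cases hb : pvALoop xs 0 1
      · rfl
      · exact absurd h (hA.mp hb)
    rw [h1, (pvIsIn_iff xs).mpr h]; rfl
  · have h2 : PySem.Str.isIn "11111"
        (PySem.Str.join "" (xs.map (fun v => if v == "-" then "1" else "0"))) = false := by
      cases hb : PySem.Str.isIn "11111" (PySem.Str.join "" (xs.map (fun v => if v == "-" then "1" else "0")))
      · rfl
      · exact absurd ((pvIsIn_iff xs).mp hb) h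
    rw [hA.mpr h, h2]; rfl
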